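-- pv_equiv track=rewrite | github.com/Continue7777/MPCNN | data.py | build_case_num
-- ===== SOURCE A (Python) =====
-- def build_case_num(label):
-- 	case_num = []
-- 	cnt = 1
-- 	for i in range(1, len(label)):
-- 		if label[i][1] == 1:
-- 			case_num.append(cnt)
-- 			cnt = 1
-- 		else:
-- 			cnt += 1
-- 	case_num.append(cnt)
-- 	return case_num
-- ===== SOURCE B (Python) =====
-- def build_case_num(label):
--     n = len(label)
--     bounds = [0] + [i for i in range(1, n) if label[i][1] == 1] + [n]
--     return [b - a for a, b in zip(bounds, bounds[1:])]
-- ===== Notes on version B (the rewrite author's own statement) =====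
-- stated objective: alternative
-- what changed: Replaces A's incremental counter-with-reset loop by a two-pass computation: collect the boundary indices where label[i][1]==1 (bracketed by 0 and len(label)) and return consecutive differences of that list.
-- intended difference: On the empty list A returns [1] (the leftover initial counter cnt=1, suggesting a group although there are no items), while B returns [0] (the single bracketed segment 0..0 has length 0), which correctly sums to the number of items. — e.g. on build_case_num([]): A returns [1], B returns [0]
import Mathlib
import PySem

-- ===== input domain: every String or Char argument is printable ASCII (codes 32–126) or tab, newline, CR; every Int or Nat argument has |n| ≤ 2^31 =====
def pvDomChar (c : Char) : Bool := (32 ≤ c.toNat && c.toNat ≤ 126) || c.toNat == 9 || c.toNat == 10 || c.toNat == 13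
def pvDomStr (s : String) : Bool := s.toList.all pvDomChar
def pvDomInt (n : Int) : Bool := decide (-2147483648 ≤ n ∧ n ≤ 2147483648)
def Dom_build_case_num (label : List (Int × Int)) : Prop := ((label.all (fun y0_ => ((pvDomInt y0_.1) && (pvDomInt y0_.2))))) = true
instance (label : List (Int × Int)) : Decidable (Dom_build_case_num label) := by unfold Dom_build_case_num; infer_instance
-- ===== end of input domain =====

-- B replaces A's counter-with-reset loop by boundary indices plus consecutive differences
-- (alternative decomposition, same cost); on the empty list A returns [1], B returns [0] (see D_ below).


-- ===== PORT A =====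
def build_case_num (label : List (Int × Int)) : List Int :=
  let st := (PySem.List.pyRange 1 (PySem.List.len label) 1).foldl
    (fun (acc : List Int × Int) i =>
      if (PySem.List.pyGetD label i ((0 : Int), (0 : Int))).2 == 1 then (acc.1 ++ [acc.2], 1)
      else (acc.1, acc.2 + 1)) ([], 1)
  st.1 ++ [st.2]

-- ===== PORT B =====
def build_case_num_alt (label : List (Int × Int)) : List Int :=
  let n : Int := PySem.List.len label
  let bounds : List Int :=
    [0] ++ ((PySem.List.pyRange 1 n 1).filter
              (fun i => (PySem.List.pyGetD label i ((0 : Int), (0 : Int))).2 == 1)) ++ [n]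
  (bounds.zip (PySem.List.slice bounds (some 1) none)).map (fun ab => ab.2 - ab.1)

-- ===== PRECONDITION & SPEC =====
-- On the empty list A returns [1] (leftover initial counter cnt=1), while B returns [0]
-- (the single bracketed segment has length 0); B's value is intended since the sizes should sum to len(label).
def D_build_case_num (label : List (Int × Int)) : Prop := label = []
instance (label : List (Int × Int)) : Decidable (D_build_case_num label) := by unfold D_build_case_num; infer_instance
def Spec_build_case_num (label : List (Int × Int)) (out : List Int) : Prop := ¬ D_build_case_num label → out = build_case_num_alt label
instance (label : List (Int × Int)) (out : List Int) : Decidable (Spec_build_case_num label out) := by unfold Spec_build_case_num; infer_instance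
def pvDiffWitness_build_case_num : (List (Int × Int)) := ([])
def pvDiffWitnessOut_build_case_num : (List Int) × (List Int) := ([1], [0])

-- ===== CLAIM (what is proved, stated in full; the proofs are below) =====
def Claim_unchanged_build_case_num : Prop := ∀ (label : List (Int × Int)), Dom_build_case_num label → Spec_build_case_num label (build_case_num label)
def Claim_changed_build_case_num : Prop := Dom_build_case_num (pvDiffWitness_build_case_num) ∧ D_build_case_num (pvDiffWitness_build_case_num) ∧ build_case_num (pvDiffWitness_build_case_num) = pvDiffWitnessOut_build_case_num.1 ∧ build_case_num_alt (pvDiffWitness_build_case_num) = pvDiffWitnessOut_build_case_num.2 ∧ pvDiffWitnessOut_build_case_num.1 ≠ pvDiffWitnessOut_build_case_num.2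
def Claim_exact_build_case_num : Prop := ∀ (label : List (Int × Int)), Dom_build_case_num label → D_build_case_num label → build_case_num label ≠ build_case_num_alt label

-- ===== LEMMAS AND PROOFS =====

/-- Reference recursion: group sizes of the tail flags starting with counter `c`. -/
def goA : List (Int × Int) → Int → List Int
  | [], c => [c]
  | p :: ps, c => if p.2 == 1 then c :: goA ps 1 else goA ps (c + 1)

/-- Boundary indices (absolute, starting at `i`) of elements whose flag is 1. -/
def bdIdx : List (Int × Int) → Int → List Int
  | [], _ => []
  | p :: ps, i => if p.2 == 1 then i :: bdIdx ps (i + 1) else bdIdx ps (i + 1)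

/-- Consecutive differences with left anchor `a`. -/
def diffs' : Int → List Int → List Int
  | _, [] => []
  | a, b :: r => (b - a) :: diffs' b r

theorem A_fold (ys : List (Int × Int)) : ∀ (acc : List Int) (c : Int),
    (ys.foldl (fun (acc : List Int × Int) p =>
        if p.2 == 1 then (acc.1 ++ [acc.2], (1 : Int)) else (acc.1, acc.2 + 1)) (acc, c)).1
      ++ [(ys.foldl (fun (acc : List Int × Int) p =>
        if p.2 == 1 then (acc.1 ++ [acc.2], (1 : Int)) else (acc.1, acc.2 + 1)) (acc, c)).2]
    = acc ++ goA ys c := by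
  induction ys with
  | nil => intro acc c; simp [goA]
  | cons p ps ih =>
    intro acc c
    by_cases h : p.2 == 1
    · rw [List.foldl_cons, if_pos h, ih (acc ++ [c]) 1]
      simp [goA, h]
    · rw [List.foldl_cons, if_neg h, ih acc (c + 1)]
      simp [goA, h]

theorem bd_filter (zs : List (Int × Int)) : ∀ (pre : List (Int × Int)),
    (PySem.List.pyRange (pre.length : Int) (((pre ++ zs).length : Nat) : Int) 1).filter
      (fun i => (PySem.List.pyGetD (pre ++ zs) i ((0 : Int), (0 : Int))).2 == 1)
    = bdIdx zs (pre.length : Int) := by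
  induction zs with
  | nil => intro pre; simp [bdIdx, PySem.List.pyRange_one_eq_nil]
  | cons p ps ih =>
    intro pre
    have hlt : (pre.length : Int) < (((pre ++ p :: ps).length : Nat) : Int) := by
      simp
    rw [PySem.List.pyRange_one_cons hlt]
    have hget : (PySem.List.pyGetD (pre ++ p :: ps) (pre.length : Int) ((0 : Int), (0 : Int))) = p := by
      simp [PySem.List.pyGetD_natCast, List.getD]
    have ih' := ih (pre ++ [p])
    simp only [List.append_assoc, List.cons_append, List.nil_append] at ih'
    have hlen : ((pre ++ [p]).length : Int) = (pre.length : Int) + 1 := by simp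
    rw [hlen] at ih'
    rw [List.filter_cons, hget]
    by_cases h : p.2 == 1
    · rw [if_pos h]
      show _ = bdIdx (p :: ps) _
      simp only [bdIdx]
      rw [if_pos h]
      exact congrArg _ ih'
    · rw [if_neg h]
      show _ = bdIdx (p :: ps) _
      simp only [bdIdx]
      rw [if_neg h]
      exact ih'

theorem diff_go (ys : List (Int × Int)) : ∀ (i c : Int),
    diffs' (i - c) (bdIdx ys i ++ [i + (ys.length : Int)]) = goA ys c := by
  induction ys with
  | nil => intro i c; simp [bdIdx, diffs', goA]
  | cons p ps ih =>
    intro i c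
    by_cases h : p.2 == 1
    · have ih' := ih (i + 1) 1
      simp only [add_sub_cancel_right] at ih'
      simp [bdIdx, diffs', goA, h, sub_sub_cancel]
      rw [show i + ((ps.length : Int) + 1) = (i + 1) + (ps.length : Int) by ring]
      exact ih'
    · have ih' := ih (i + 1) (c + 1)
      rw [show i + 1 - (c + 1) = i - c by ring] at ih'
      simp [bdIdx, goA, h]
      rw [show i + ((ps.length : Int) + 1) = (i + 1) + (ps.length : Int) by ring]
      exact ih'

theorem zip_diffs (bs : List Int) : ∀ (a : Int),
    (((a :: bs).zip bs).map (fun ab => ab.2 - ab.1)) = diffs' a bs := by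
  induction bs with
  | nil => intro a; simp [diffs']
  | cons b r ih =>
    intro a
    have ih' := ih b
    simp [List.zip] at ih' ⊢
    simp [diffs', ih']

theorem build_case_num_spec : Claim_unchanged_build_case_num := by
  intro label _
  unfold Spec_build_case_num
  intro hne
  cases label with
  | nil => exact absurd rfl hne
  | cons p ys =>
    -- A side
    unfold build_case_num
    simp only [PySem.List.len_eq]
    rw [PySem.List.foldl_pyRange_pyGetD' (p :: ys) ((0 : Int), (0 : Int))
      (fun (acc : List Int × Int) q =>
        if q.2 == 1 then (acc.1 ++ [acc.2], (1 : Int)) else (acc.1, acc.2 + 1)) ([], 1) (show (0:Int) ≤ 1 by norm_num)]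
    simp only [Int.toNat_one, List.drop_one, List.tail_cons]
    rw [A_fold ys [] 1]
    -- B side
    unfold build_case_num_alt
    simp only [PySem.List.len_eq]
    have hfil := bd_filter ys [p]
    simp only [List.length_cons, List.length_nil, List.singleton_append] at hfil ⊢
    norm_num at hfil
    push_cast
    rw [hfil]
    rw [PySem.List.slice_from_one]
    simp only [List.nil_append, List.cons_append, List.tail_cons]
    rw [zip_diffs (bdIdx ys 1 ++ [(ys.length : Int) + 1]) 0]
    have := diff_go ys 1 1
    simp only [sub_self] at this
    rw [show ((ys.length : Int) + 1) = 1 + (ys.length : Int) by ring]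
    rw [this]

-- ===== VERDICT =====
theorem build_case_num_changed : Claim_changed_build_case_num := by
  unfold Claim_changed_build_case_num; decide

theorem build_case_num_tight : Claim_exact_build_case_num := by
  intro label _ hD
  unfold D_build_case_num at hD
  subst hD
  decide
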